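-- pv_equiv track=rewrite | github.com/Cxh-0232/DNA- | threading_lab2.py | process_diagonal
-- ===== SOURCE A (Python) =====
-- def kmer_match(s1, s2, k, m):
--     """
--     检查两个k-mer是否匹配，允许最多m个错配
--     """
--     if len(s1) != len(s2):
--         return False
--     mismatches = 0
--     for a, b in zip(s1, s2):
--         if a != b:
--             mismatches += 1
--             if mismatches > m:
--                 return False
--     return True
--
-- def process_diagonal(d, ref_seq, que_seq, k, m, ref_len, que_len):
--     """
--     处理单个对角线，用于多线程
--     """
--     i_start = max(d, 0)
--     j_start = max(-d, 0)
--     diag_len = min(ref_len - i_start, que_len - j_start)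
--
--     matches = []
--     i, j = i_start, j_start
--     temp = 0
--
--     while i < i_start + diag_len and j < que_len:
--         current_k = min(k, i_start + diag_len - i)
--         ref_kmer = ref_seq[i:i+current_k]
--         que_kmer = que_seq[j:j+current_k]
--
--         if current_k == k and kmer_match(ref_kmer, que_kmer, k, m):
--             matches.extend((i + a, j + a) for a in range(current_k))
--             i += k
--             j += k
--             temp = 1
--         elif current_k == k and not kmer_match(ref_kmer, que_kmer, k, m):
--             if temp == 1:
--                 while i < i_start + diag_len and j < que_len and ref_seq[i] == que_seq[j]:
--                     matches.append((i, j))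
--                     i += 1
--                     j += 1
--                 temp = 0
--             else:
--                 i += 1
--                 j += 1
--         elif current_k < k and ref_kmer == que_kmer:
--             matches.extend((i + a, j + a) for a in range(current_k))
--             i += current_k
--             j += current_k
--         else:
--             if ref_seq[i] == que_seq[j] and temp == 1:
--                 matches.append((i, j))
--             i += 1
--             j += 1
--
--     return matches
-- ===== SOURCE B (Python) =====
-- def process_diagonal(d, ref_seq, que_seq, k, m, ref_len, que_len):
--     i0 = max(d, 0)
--     j0 = max(-d, 0)
--     n = min(ref_len - i0, que_len - j0)
--     if n <= 0:
--         return []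
--     # prefix sums of per-position mismatches along the diagonal: P[t] = #mismatches in positions [0, t)
--     P = [0]
--     for t in range(n):
--         P.append(P[t] + (1 if ref_seq[i0 + t] != que_seq[j0 + t] else 0))
--     matches = []
--     t = 0
--     temp = 0
--     while t < n:
--         ck = min(k, n - t)
--         if ck == k:
--             w = P[t + k] - P[t]
--             if w == 0 or w <= m:
--                 matches.extend((i0 + t + a, j0 + t + a) for a in range(k))
--                 t += k
--                 temp = 1
--             elif temp == 1:
--                 while t < n and P[t + 1] == P[t]:
--                     matches.append((i0 + t, j0 + t))
--                     t += 1
--                 temp = 0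
--             else:
--                 t += 1
--         elif P[n] == P[t]:
--             matches.extend((i0 + t + a, j0 + t + a) for a in range(ck))
--             t += ck
--         else:
--             if P[t + 1] == P[t] and temp == 1:
--                 matches.append((i0 + t, j0 + t))
--             t += 1
--     return matches
-- ===== Notes on version B (the rewrite author's own statement) =====
-- stated objective: faster
-- what changed: B precomputes one prefix-sum array of per-position mismatches along the diagonal and answers every k-mer window test (and the tail/char comparisons) in O(1) arithmetic on it, instead of A's rescanning of each k-mer character by character at every loop position.
-- outside the precondition, e.g. on process_diagonal(0, 'a', 'a', 1, 0, 3, 3): A returns [(0, 0), (1, 1), (2, 2)], B raises IndexError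
import Mathlib
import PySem

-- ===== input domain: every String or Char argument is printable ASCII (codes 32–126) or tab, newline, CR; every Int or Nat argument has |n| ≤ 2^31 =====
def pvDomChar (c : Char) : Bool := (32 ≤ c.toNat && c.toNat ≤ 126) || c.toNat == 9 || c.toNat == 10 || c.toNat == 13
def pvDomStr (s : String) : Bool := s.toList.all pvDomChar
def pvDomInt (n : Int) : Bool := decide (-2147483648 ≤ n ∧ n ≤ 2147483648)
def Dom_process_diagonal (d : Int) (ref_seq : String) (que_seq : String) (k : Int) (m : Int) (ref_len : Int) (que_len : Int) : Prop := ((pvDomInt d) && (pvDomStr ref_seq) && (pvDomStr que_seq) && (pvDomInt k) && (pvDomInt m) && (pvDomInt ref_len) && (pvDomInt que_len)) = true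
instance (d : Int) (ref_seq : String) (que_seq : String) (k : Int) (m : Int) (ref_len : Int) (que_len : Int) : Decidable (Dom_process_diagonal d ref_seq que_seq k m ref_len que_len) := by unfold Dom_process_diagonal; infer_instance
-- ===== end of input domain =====

-- B replaces A's repeated k-mer rescans by one prefix-sum array of per-position mismatches,
-- answering each window test in O(1); equivalence is proved on Pre_ (the natural call domain).

-- ===== PORT A =====

-- kmer_match: mismatch counter with early exit, over zip(s1, s2)
def pvKmLoop : List (Char × Char) → Int → Int → Bool
  | [], _, _ => true
  | (a, b) :: rest, mis, m =>
    if a ≠ b then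
      if mis + 1 > m then false else pvKmLoop rest (mis + 1) m
    else pvKmLoop rest mis m

def kmer_match (s1 s2 : List Char) (k m : Int) : Bool :=
  if s1.length ≠ s2.length then false
  else pvKmLoop (s1.zip s2) 0 m

-- inner 'while ... and ref_seq[i] == que_seq[j]' loop; on an out-of-range index Python
-- raises IndexError (unreachable under Pre_) — the port stops there
def pvAInner (ref que : List Char) (hi que_len : Int) : Nat → Int → Int → List (Int × Int) → List (Int × Int) × Int × Int
  | 0, i, j, ms => (ms, i, j)
  | fuel + 1, i, j, ms =>
    if i < hi ∧ j < que_len then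
      match PySem.List.pyGet? ref i, PySem.List.pyGet? que j with
      | some a, some b =>
        if a = b then pvAInner ref que hi que_len fuel (i + 1) (j + 1) (ms ++ [(i, j)])
        else (ms, i, j)
      | _, _ => (ms, i, j)
    else (ms, i, j)

-- main 'while i < i_start + diag_len and j < que_len' loop (fuel bounds the iterations;
-- 2*diag_len+2 suffices since i advances, or temp falls to 0, each round)
def pvALoop (ref que : List Char) (i_start diag_len que_len k m : Int) : Nat → Int → Int → Int → List (Int × Int) → List (Int × Int)
  | 0, _, _, _, ms => ms
  | fuel + 1, i, j, temp, ms =>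
    if i < i_start + diag_len ∧ j < que_len then
      let current_k := min k (i_start + diag_len - i)
      let ref_kmer := PySem.List.slice ref (some i) (some (i + current_k))
      let que_kmer := PySem.List.slice que (some j) (some (j + current_k))
      if current_k = k ∧ kmer_match ref_kmer que_kmer k m = true then
        pvALoop ref que i_start diag_len que_len k m fuel (i + k) (j + k) 1
          (ms ++ (PySem.List.pyRange 0 current_k 1).map (fun a => (i + a, j + a)))
      else if current_k = k ∧ ¬ kmer_match ref_kmer que_kmer k m = true then
        if temp = 1 then
          match pvAInner ref que (i_start + diag_len) que_len (diag_len.toNat + 1) i j ms with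
          | (ms', i', j') => pvALoop ref que i_start diag_len que_len k m fuel i' j' 0 ms'
        else pvALoop ref que i_start diag_len que_len k m fuel (i + 1) (j + 1) temp ms
      else if current_k < k ∧ ref_kmer = que_kmer then
        pvALoop ref que i_start diag_len que_len k m fuel (i + current_k) (j + current_k) temp
          (ms ++ (PySem.List.pyRange 0 current_k 1).map (fun a => (i + a, j + a)))
      else
        let ms' :=
          match PySem.List.pyGet? ref i, PySem.List.pyGet? que j with
          | some a, some b => if a = b ∧ temp = 1 then ms ++ [(i, j)] else ms
          | _, _ => ms  -- Python raises IndexError here; unreachable under Pre_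
        pvALoop ref que i_start diag_len que_len k m fuel (i + 1) (j + 1) temp ms'
    else ms

def process_diagonal (d : Int) (ref_seq : String) (que_seq : String) (k : Int) (m : Int) (ref_len : Int) (que_len : Int) : List (Int × Int) :=
  let i_start := max d 0
  let j_start := max (-d) 0
  let diag_len := min (ref_len - i_start) (que_len - j_start)
  pvALoop ref_seq.toList que_seq.toList i_start diag_len que_len k m
    (2 * diag_len.toNat + 2) i_start j_start 0 []

-- ===== PORT B =====

-- per-position mismatch indicator along the diagonal: 1 if ref_seq[i0+t] != que_seq[j0+t] else 0
def pvMis (ref que : List Char) (i0 j0 : Int) (t : Nat) : Int :=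
  if PySem.List.pyGetD ref (i0 + (t : Int)) ' ' ≠ PySem.List.pyGetD que (j0 + (t : Int)) ' ' then 1 else 0

-- P = [0]; for t in range(n): P.append(P[t] + mis(t))
def pvBuildP (f : Nat → Int) : Nat → List Int
  | 0 => [0]
  | t + 1 =>
    let p := pvBuildP f t
    p ++ [PySem.List.pyGetD p (t : Int) 0 + f t]

-- inner 'while t < n and P[t+1] == P[t]' loop
def pvBInner (P : List Int) (i0 j0 n : Int) : Nat → Int → List (Int × Int) → List (Int × Int) × Int
  | 0, t, ms => (ms, t)
  | fuel + 1, t, ms =>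
    if t < n ∧ PySem.List.pyGetD P (t + 1) 0 = PySem.List.pyGetD P t 0 then
      pvBInner P i0 j0 n fuel (t + 1) (ms ++ [(i0 + t, j0 + t)])
    else (ms, t)

-- main 'while t < n' loop of B
def pvBLoop (P : List Int) (i0 j0 n k m : Int) : Nat → Int → Int → List (Int × Int) → List (Int × Int)
  | 0, _, _, ms => ms
  | fuel + 1, t, temp, ms =>
    if t < n then
      let ck := min k (n - t)
      if ck = k then
        if PySem.List.pyGetD P (t + k) 0 - PySem.List.pyGetD P t 0 = 0 ∨
           PySem.List.pyGetD P (t + k) 0 - PySem.List.pyGetD P t 0 ≤ m then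
          pvBLoop P i0 j0 n k m fuel (t + k) 1
            (ms ++ (PySem.List.pyRange 0 k 1).map (fun a => (i0 + t + a, j0 + t + a)))
        else if temp = 1 then
          match pvBInner P i0 j0 n (n.toNat + 1) t ms with
          | (ms', t') => pvBLoop P i0 j0 n k m fuel t' 0 ms'
        else pvBLoop P i0 j0 n k m fuel (t + 1) temp ms
      else if PySem.List.pyGetD P n 0 = PySem.List.pyGetD P t 0 then
        pvBLoop P i0 j0 n k m fuel (t + ck) temp
          (ms ++ (PySem.List.pyRange 0 ck 1).map (fun a => (i0 + t + a, j0 + t + a)))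
      else
        pvBLoop P i0 j0 n k m fuel (t + 1) temp
          (if PySem.List.pyGetD P (t + 1) 0 = PySem.List.pyGetD P t 0 ∧ temp = 1 then
             ms ++ [(i0 + t, j0 + t)] else ms)
    else ms

def process_diagonal_alt (d : Int) (ref_seq : String) (que_seq : String) (k : Int) (m : Int) (ref_len : Int) (que_len : Int) : List (Int × Int) :=
  let i0 := max d 0
  let j0 := max (-d) 0
  let n := min (ref_len - i0) (que_len - j0)
  if n ≤ 0 then []
  else
    let P := pvBuildP (pvMis ref_seq.toList que_seq.toList i0 j0) n.toNat
    pvBLoop P i0 j0 n k m (2 * n.toNat + 2) 0 0 []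

-- ===== PRECONDITION & SPEC =====
-- Pre_ excludes k ≤ 0 on a non-empty diagonal (A loops forever there) and length parameters
-- exceeding the true string lengths (A then raises IndexError or, via silently clipped slices,
-- returns coordinate pairs past the end of the strings, which B's prefix-sum pass cannot index).
def Pre_process_diagonal (d : Int) (ref_seq : String) (que_seq : String) (k : Int) (m : Int) (ref_len : Int) (que_len : Int) : Prop :=
  min (ref_len - max d 0) (que_len - max (-d) 0) ≤ 0 ∨
  (1 ≤ k ∧ ref_len ≤ (ref_seq.toList.length : Int) ∧ que_len ≤ (que_seq.toList.length : Int))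
instance (d : Int) (ref_seq : String) (que_seq : String) (k : Int) (m : Int) (ref_len : Int) (que_len : Int) : Decidable (Pre_process_diagonal d ref_seq que_seq k m ref_len que_len) := by unfold Pre_process_diagonal; infer_instance

def pvWitness_process_diagonal : Int × String × String × Int × Int × Int × Int := (0, "ACGT", "ACCT", 2, 1, 4, 4)

def Spec_process_diagonal (d : Int) (ref_seq : String) (que_seq : String) (k : Int) (m : Int) (ref_len : Int) (que_len : Int) (out : List (Int × Int)) : Prop := out = process_diagonal_alt d ref_seq que_seq k m ref_len que_len
instance (d : Int) (ref_seq : String) (que_seq : String) (k : Int) (m : Int) (ref_len : Int) (que_len : Int) (out : List (Int × Int)) : Decidable (Spec_process_diagonal d ref_seq que_seq k m ref_len que_len out) := by unfold Spec_process_diagonal; infer_instance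

-- ===== CLAIM (what is proved, stated in full; the proofs are below) =====
def Claim_equal_process_diagonal : Prop := ∀ (d : Int) (ref_seq : String) (que_seq : String) (k : Int) (m : Int) (ref_len : Int) (que_len : Int), Dom_process_diagonal d ref_seq que_seq k m ref_len que_len → Pre_process_diagonal d ref_seq que_seq k m ref_len que_len → Spec_process_diagonal d ref_seq que_seq k m ref_len que_len (process_diagonal d ref_seq que_seq k m ref_len que_len)


-- ===== LEMMAS AND PROOFS =====

-- prefix sums: pvF f t = f 0 + ... + f (t-1)
def pvF (f : Nat → Int) (t : Nat) : Int := ((List.range t).map f).sum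

theorem pvF_succ (f : Nat → Int) (t : Nat) : pvF f (t + 1) = pvF f t + f t := by
  simp [pvF, List.range_succ]

theorem pvBuildP_eq (f : Nat → Int) : ∀ N, pvBuildP f N = (List.range (N + 1)).map (pvF f)
  | 0 => by simp [pvBuildP, pvF]
  | N + 1 => by
    rw [pvBuildP, pvBuildP_eq f N]
    rw [show ((N:Int)) = ((N:Nat):Int) from rfl, PySem.List.pyGetD_natCast]
    rw [List.getD_eq_getElem _ _ (by simp)]
    simp [List.range_succ, pvF_succ]

theorem pvP_get (f : Nat → Int) (N s : Nat) (h : s ≤ N) :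
    PySem.List.pyGetD (pvBuildP f N) (s : Int) 0 = pvF f s := by
  rw [pvBuildP_eq, PySem.List.pyGetD_natCast]
  rw [List.getD_eq_getElem _ _ (by simp; omega)]
  simp

theorem pvMis_natCast (ref que : List Char) (I J : Nat) (t : Nat) :
    pvMis ref que (I : Int) (J : Int) t
      = if ref.getD (I + t) ' ' = que.getD (J + t) ' ' then 0 else 1 := by
  unfold pvMis
  rw [show (I : Int) + (t : Int) = ((I + t : Nat) : Int) by push_cast; ring]
  rw [show (J : Int) + (t : Int) = ((J + t : Nat) : Int) by push_cast; ring]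
  rw [PySem.List.pyGetD_natCast, PySem.List.pyGetD_natCast]
  by_cases h : ref.getD (I + t) ' ' = que.getD (J + t) ' ' <;> simp

theorem pvMis_bounds (ref que : List Char) (I J : Nat) (t : Nat) :
    0 ≤ pvMis ref que (I : Int) (J : Int) t ∧ pvMis ref que (I : Int) (J : Int) t ≤ 1 := by
  rw [pvMis_natCast]; split <;> simp

theorem pvF_window_nonneg (ref que : List Char) (I J : Nat) :
    ∀ (c t : Nat), 0 ≤ pvF (pvMis ref que (I : Int) (J : Int)) (t + c)
      - pvF (pvMis ref que (I : Int) (J : Int)) t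
  | 0, t => by simp
  | c + 1, t => by
    have ih := pvF_window_nonneg ref que I J c t
    have hb := pvMis_bounds ref que I J (t + c)
    rw [show t + (c + 1) = (t + c) + 1 by omega, pvF_succ]
    omega

theorem pvGet_some (l : List Char) (I t : Nat) (h : I + t < l.length) :
    PySem.List.pyGet? l ((I : Int) + (t : Int)) = some (l.getD (I + t) ' ') := by
  rw [show (I : Int) + (t : Int) = ((I + t : Nat) : Int) by push_cast; ring]
  rw [PySem.List.pyGet?_natCast]
  rw [List.getElem?_eq_getElem h, List.getD_eq_getElem _ _ h]



-- kmer_match's counting loop over a diagonal window, expressed through prefix sums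
theorem pvWindow_km (ref que : List Char) (I J : Nat) (m : Int) :
    ∀ (c t : Nat) (mis : Int), I + (t + c) ≤ ref.length → J + (t + c) ≤ que.length →
    (pvKmLoop (((ref.drop (I + t)).take c).zip ((que.drop (J + t)).take c)) mis m = true
      ↔ (pvF (pvMis ref que (I : Int) (J : Int)) (t + c) - pvF (pvMis ref que (I : Int) (J : Int)) t = 0
         ∨ mis + (pvF (pvMis ref que (I : Int) (J : Int)) (t + c) - pvF (pvMis ref que (I : Int) (J : Int)) t) ≤ m))
  | 0, t, mis, hr, hq => by simp [pvKmLoop]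
  | c + 1, t, mis, hr, hq => by
    have hIt : I + t < ref.length := by omega
    have hJt : J + t < que.length := by omega
    rw [List.drop_eq_getElem_cons hIt, List.drop_eq_getElem_cons hJt]
    simp only [List.take_succ_cons, List.zip_cons_cons]
    have hstep : pvF (pvMis ref que (I : Int) (J : Int)) (t + (c + 1))
        = pvF (pvMis ref que (I : Int) (J : Int)) (t + 1)
          + (pvF (pvMis ref que (I : Int) (J : Int)) ((t + 1) + c)
             - pvF (pvMis ref que (I : Int) (J : Int)) (t + 1)) := by
      rw [show t + (c + 1) = (t + 1) + c by omega]; ring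
    have hW' := pvF_window_nonneg ref que I J c (t + 1)
    have hF1 := pvF_succ (pvMis ref que (I : Int) (J : Int)) t
    have hmis := pvMis_natCast ref que I J t
    rw [List.getD_eq_getElem _ _ hIt, List.getD_eq_getElem _ _ hJt] at hmis
    have ihm := pvWindow_km ref que I J m c (t + 1) mis (by omega) (by omega)
    have ihm1 := pvWindow_km ref que I J m c (t + 1) (mis + 1) (by omega) (by omega)
    rw [show I + (t + 1) = I + t + 1 by omega, show J + (t + 1) = J + t + 1 by omega] at ihm ihm1
    by_cases hab : ref[I + t] = que[J + t]
    · have hm0 : pvMis ref que (I : Int) (J : Int) t = 0 := by rw [hmis, if_pos hab]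
      rw [pvKmLoop, if_neg (by simp [hab])]
      rw [ihm]
      constructor
      · rintro (h | h)
        · left; rw [hstep]; omega
        · right; rw [hstep]; omega
      · rintro (h | h)
        · left; rw [hstep] at h; omega
        · right; rw [hstep] at h; omega
    · have hm1 : pvMis ref que (I : Int) (J : Int) t = 1 := by rw [hmis, if_neg hab]
      rw [pvKmLoop, if_pos (by simp [hab])]
      by_cases hex : mis + 1 > m
      · rw [if_pos hex]
        simp only [Bool.false_eq_true, false_iff]
        rw [hstep]
        push Not
        constructor <;> omega
      · rw [if_neg hex]
        rw [ihm1]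
        rw [hstep]
        constructor
        · rintro (h | h) <;> (right; omega)
        · rintro (h | h)
          · omega
          · right; omega

-- equality of the two tail windows, expressed through prefix sums
theorem pvWindow_eq (ref que : List Char) (I J : Nat) :
    ∀ (c t : Nat), I + (t + c) ≤ ref.length → J + (t + c) ≤ que.length →
    ((ref.drop (I + t)).take c = (que.drop (J + t)).take c
      ↔ pvF (pvMis ref que (I : Int) (J : Int)) (t + c) - pvF (pvMis ref que (I : Int) (J : Int)) t = 0)
  | 0, t, hr, hq => by simp
  | c + 1, t, hr, hq => by
    have hIt : I + t < ref.length := by omega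
    have hJt : J + t < que.length := by omega
    rw [List.drop_eq_getElem_cons hIt, List.drop_eq_getElem_cons hJt]
    simp only [List.take_succ_cons, List.cons.injEq]
    have hW' := pvF_window_nonneg ref que I J c (t + 1)
    have hF1 := pvF_succ (pvMis ref que (I : Int) (J : Int)) t
    have hb := pvMis_bounds ref que I J t
    have hmis := pvMis_natCast ref que I J t
    rw [List.getD_eq_getElem _ _ hIt, List.getD_eq_getElem _ _ hJt] at hmis
    have ih := pvWindow_eq ref que I J c (t + 1) (by omega) (by omega)
    rw [show I + (t + 1) = I + t + 1 by omega, show J + (t + 1) = J + t + 1 by omega] at ih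
    have hstep : pvF (pvMis ref que (I : Int) (J : Int)) (t + (c + 1))
        = pvF (pvMis ref que (I : Int) (J : Int)) (t + 1)
          + (pvF (pvMis ref que (I : Int) (J : Int)) ((t + 1) + c)
             - pvF (pvMis ref que (I : Int) (J : Int)) (t + 1)) := by
      rw [show t + (c + 1) = (t + 1) + c by omega]; ring
    rw [ih]
    constructor
    · rintro ⟨hab, hW0⟩
      have : pvMis ref que (I : Int) (J : Int) t = 0 := by rw [hmis, if_pos hab]
      rw [hstep]; omega
    · intro h
      rw [hstep] at h
      have hm0 : pvMis ref que (I : Int) (J : Int) t = 0 := by omega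
      constructor
      · by_contra hab
        rw [hmis, if_neg hab] at hm0; omega
      · omega

-- the two inner character-extension loops agree (B reads P, A reads the strings)
theorem pvInner_eq (ref que : List Char) (I J NN : Nat) (que_len : Int)
    (hr : I + NN ≤ ref.length) (hq : J + NN ≤ que.length) (hql : (J : Int) + NN ≤ que_len) :
    ∀ (fuel t : Nat) (ms : List (Int × Int)), t ≤ NN →
    ∃ (t' : Nat) (ms' : List (Int × Int)), t ≤ t' ∧ t' ≤ NN ∧
      pvBInner (pvBuildP (pvMis ref que (I : Int) (J : Int)) NN) (I : Int) (J : Int) (NN : Int)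
        fuel (t : Int) ms = (ms', (t' : Int)) ∧
      pvAInner ref que ((I : Int) + NN) que_len fuel ((I : Int) + t) ((J : Int) + t) ms
        = (ms', (I : Int) + t', (J : Int) + t')
  | 0, t, ms, htN => ⟨t, ms, le_refl _, htN, by simp [pvBInner], by simp [pvAInner]⟩
  | fuel + 1, t, ms, htN => by
    by_cases ht : t < NN
    · have hIt : I + t < ref.length := by omega
      have hJt : J + t < que.length := by omega
      have hget := pvGet_some ref I t hIt
      have hgeq := pvGet_some que J t hJt
      have hP1 := pvP_get (pvMis ref que (I : Int) (J : Int)) NN (t + 1) (by omega)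
      have hP0 := pvP_get (pvMis ref que (I : Int) (J : Int)) NN t (by omega)
      have hcast : ((t : Int) + 1) = ((t + 1 : Nat) : Int) := by push_cast; ring
      have hmis := pvMis_natCast ref que I J t
      by_cases hab : ref.getD (I + t) ' ' = que.getD (J + t) ' '
      case pos =>
        obtain ⟨t', ms', h1, h2, hB, hA⟩ := pvInner_eq ref que I J NN que_len hr hq hql fuel
          (t + 1) (ms ++ [((I : Int) + t, (J : Int) + t)]) (by omega)
        refine ⟨t', ms', by omega, h2, ?_, ?_⟩
        · rw [pvBInner, if_pos ⟨by exact_mod_cast ht, by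
            rw [hcast, hP1, hP0, pvF_succ, hmis, if_pos hab]; ring⟩]
          rw [hcast]
          exact hB
        · rw [pvAInner, if_pos ⟨by omega, by omega⟩, hget, hgeq]
          simp only [if_pos hab]
          rw [show (I : Int) + t + 1 = (I : Int) + ((t + 1 : Nat) : Int) by push_cast; ring,
              show (J : Int) + t + 1 = (J : Int) + ((t + 1 : Nat) : Int) by push_cast; ring]
          exact hA
      case neg =>
        refine ⟨t, ms, le_refl _, htN, ?_, ?_⟩
        · rw [pvBInner, if_neg ?_]
          rintro ⟨-, hc⟩
          rw [hcast, hP1, hP0, pvF_succ, hmis, if_neg hab] at hc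
          omega
        · rw [pvAInner, if_pos ⟨by omega, by omega⟩, hget, hgeq]
          simp only [if_neg hab]
    · refine ⟨t, ms, le_refl _, htN, ?_, ?_⟩
      · rw [pvBInner, if_neg ?_]
        rintro ⟨hc, -⟩
        have : (t : Int) < (NN : Int) := hc
        omega
      · rw [pvAInner, if_neg ?_]
        rintro ⟨hc, -⟩
        omega

-- the two main loops agree step for step (A rescans k-mers, B reads the prefix-sum array)
theorem pvLoop_eq (ref que : List Char) (I J NN : Nat) (que_len k m : Int)
    (hk : 1 ≤ k) (hr : I + NN ≤ ref.length) (hq : J + NN ≤ que.length)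
    (hql : (J : Int) + NN ≤ que_len) :
    ∀ (fuel t : Nat) (temp : Int) (ms : List (Int × Int)), t ≤ NN →
    pvALoop ref que (I : Int) (NN : Int) que_len k m fuel ((I : Int) + t) ((J : Int) + t) temp ms
      = pvBLoop (pvBuildP (pvMis ref que (I : Int) (J : Int)) NN) (I : Int) (J : Int) (NN : Int)
          k m fuel (t : Int) temp ms
  | 0, t, temp, ms, htN => by simp [pvALoop, pvBLoop]
  | fuel + 1, t, temp, ms, htN => by
    by_cases ht : t < NN
    case neg =>
      rw [pvALoop, if_neg (by rintro ⟨hc, -⟩; omega), pvBLoop, if_neg (by intro hc; omega)]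
    case pos =>
    simp only [pvALoop, pvBLoop]
    rw [show (I : Int) + (NN : Int) - ((I : Int) + (t : Int)) = (NN : Int) - (t : Int) by ring]
    rw [if_pos (show (I : Int) + t < (I : Int) + NN ∧ (J : Int) + t < que_len by
      constructor <;> omega)]
    rw [if_pos (show (t : Int) < (NN : Int) by omega)]
    have hPt := pvP_get (pvMis ref que (I : Int) (J : Int)) NN t (by omega)
    by_cases hck : k ≤ (NN : Int) - (t : Int)
    case pos =>
      have hminK : min k ((NN : Int) - (t : Int)) = k := min_eq_left hck
      rw [hminK]
      have hc0 : (k.toNat : Int) = k := Int.toNat_of_nonneg (by omega)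
      set c : Nat := k.toNat with hc
      have htc : t + c ≤ NN := by omega
      have hscast : (I : Int) + (t : Int) = ((I + t : Nat) : Int) := by push_cast; ring
      have hscast2 : (J : Int) + (t : Int) = ((J + t : Nat) : Int) := by push_cast; ring
      rw [show (I : Int) + (t : Int) + k = ((I + t : Nat) : Int) + (c : Int) by rw [hc0]; push_cast; ring]
      rw [show (J : Int) + (t : Int) + k = ((J + t : Nat) : Int) + (c : Int) by rw [hc0]; push_cast; ring]
      rw [hscast, hscast2, PySem.List.slice_natCast_add, PySem.List.slice_natCast_add,
          ← hscast, ← hscast2]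
      have hlen1 : ((ref.drop (I + t)).take c).length = c := by
        simp only [List.length_take, List.length_drop]; omega
      have hlen2 : ((que.drop (J + t)).take c).length = c := by
        simp only [List.length_take, List.length_drop]; omega
      have hkmv : kmer_match ((ref.drop (I + t)).take c) ((que.drop (J + t)).take c) k m
          = pvKmLoop (((ref.drop (I + t)).take c).zip ((que.drop (J + t)).take c)) 0 m := by
        rw [kmer_match, hlen1, hlen2]
        simp
      rw [hkmv]
      have hkm := pvWindow_km ref que I J m c t 0 (by omega) (by omega)
      have hPtc := pvP_get (pvMis ref que (I : Int) (J : Int)) NN (t + c) (by omega)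
      rw [show (t : Int) + k = ((t + c : Nat) : Int) by rw [← hc0]; push_cast; ring, hPtc, hPt]
      set F := pvF (pvMis ref que (I : Int) (J : Int)) with hF
      by_cases hw : F (t + c) - F t = 0 ∨ F (t + c) - F t ≤ m
      case pos =>
        have hkmT : pvKmLoop (((ref.drop (I + t)).take c).zip ((que.drop (J + t)).take c)) 0 m
            = true := hkm.mpr (by omega)
        rw [if_pos ⟨rfl, hkmT⟩, if_pos rfl, if_pos hw]
        rw [show (I : Int) + (t : Int) + (c : Int) = (I : Int) + ((t + c : Nat) : Int) by
              push_cast; ring,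
            show (J : Int) + (t : Int) + (c : Int) = (J : Int) + ((t + c : Nat) : Int) by
              push_cast; ring]
        exact pvLoop_eq ref que I J NN que_len k m hk hr hq hql fuel (t + c) 1 _ htc
      case neg =>
        have hkmF : ¬ pvKmLoop (((ref.drop (I + t)).take c).zip ((que.drop (J + t)).take c)) 0 m
            = true := fun h => hw (by have := hkm.mp h; omega)
        rw [if_neg (by rintro ⟨-, hkmT⟩; exact hkmF hkmT),
            if_pos ⟨rfl, hkmF⟩, if_pos rfl, if_neg hw]
        by_cases htemp : temp = 1
        · rw [if_pos htemp, if_pos htemp]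
          obtain ⟨t', ms', h1, h2, hB, hA⟩ := pvInner_eq ref que I J NN que_len hr hq hql
            (NN + 1) t ms (by omega)
          rw [show ((NN : Int)).toNat = NN by omega, hA, hB]
          exact pvLoop_eq ref que I J NN que_len k m hk hr hq hql fuel t' 0 ms' h2
        · rw [if_neg htemp, if_neg htemp]
          rw [show (I : Int) + (t : Int) + 1 = (I : Int) + ((t + 1 : Nat) : Int) by push_cast; ring,
              show (J : Int) + (t : Int) + 1 = (J : Int) + ((t + 1 : Nat) : Int) by push_cast; ring,
              show (t : Int) + 1 = ((t + 1 : Nat) : Int) by push_cast; ring]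
          exact pvLoop_eq ref que I J NN que_len k m hk hr hq hql fuel (t + 1) temp ms (by omega)
    case neg =>
      have hminC : min k ((NN : Int) - (t : Int)) = (NN : Int) - (t : Int) :=
        min_eq_right (by omega)
      rw [hminC]
      have hne : ¬((NN : Int) - (t : Int) = k) := by omega
      set c : Nat := NN - t with hc
      have hc0 : (c : Int) = (NN : Int) - (t : Int) := by rw [hc]; omega
      have hscast : (I : Int) + (t : Int) = ((I + t : Nat) : Int) := by push_cast; ring
      have hscast2 : (J : Int) + (t : Int) = ((J + t : Nat) : Int) := by push_cast; ring
      rw [show (I : Int) + (t : Int) + ((NN : Int) - (t : Int)) = ((I + t : Nat) : Int) + (c : Int) by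
            rw [hc0]; push_cast; ring,
          show (J : Int) + (t : Int) + ((NN : Int) - (t : Int)) = ((J + t : Nat) : Int) + (c : Int) by
            rw [hc0]; push_cast; ring]
      rw [hscast, hscast2, PySem.List.slice_natCast_add, PySem.List.slice_natCast_add,
          ← hscast, ← hscast2]
      have hweq := pvWindow_eq ref que I J c t (by omega) (by omega)
      rw [show t + c = NN by omega] at hweq
      have hPN := pvP_get (pvMis ref que (I : Int) (J : Int)) NN NN (le_refl _)
      rw [hPN, hPt]
      rw [if_neg (by rintro ⟨hc1, -⟩; exact hne hc1),
          if_neg (by rintro ⟨hc1, -⟩; exact hne hc1),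
          if_neg hne]
      set F := pvF (pvMis ref que (I : Int) (J : Int)) with hF
      by_cases heq : F NN = F t
      case pos =>
        rw [if_pos ⟨by omega, hweq.mpr (by omega)⟩, if_pos heq]
        rw [show (I : Int) + (t : Int) + (c : Int) = (I : Int) + ((NN : Nat) : Int) by rw [hc0]; ring,
            show (J : Int) + (t : Int) + (c : Int) = (J : Int) + ((NN : Nat) : Int) by rw [hc0]; ring,
            show (t : Int) + ((NN : Int) - (t : Int)) = ((NN : Nat) : Int) by ring]
        exact pvLoop_eq ref que I J NN que_len k m hk hr hq hql fuel NN temp _ (le_refl _)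
      case neg =>
        rw [if_neg (by rintro ⟨-, hc1⟩; exact heq (by have := hweq.mp hc1; omega)),
            if_neg heq]
        have hIt : I + t < ref.length := by omega
        have hJt : J + t < que.length := by omega
        rw [pvGet_some ref I t hIt, pvGet_some que J t hJt]
        have hP1 := pvP_get (pvMis ref que (I : Int) (J : Int)) NN (t + 1) (by omega)
        have hmis := pvMis_natCast ref que I J t
        rw [show (I : Int) + (t : Int) + 1 = (I : Int) + ((t + 1 : Nat) : Int) by push_cast; ring,
            show (J : Int) + (t : Int) + 1 = (J : Int) + ((t + 1 : Nat) : Int) by push_cast; ring,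
            show (t : Int) + 1 = ((t + 1 : Nat) : Int) by push_cast; ring]
        have hcond : (PySem.List.pyGetD (pvBuildP (pvMis ref que (I : Int) (J : Int)) NN)
              ((t + 1 : Nat) : Int) 0 = F t)
            ↔ ref.getD (I + t) ' ' = que.getD (J + t) ' ' := by
          rw [hP1, hF, pvF_succ, hmis]
          split
          · simp_all
          · constructor
            · intro hc1; omega
            · intro hc1; simp_all
        rw [pvLoop_eq ref que I J NN que_len k m hk hr hq hql fuel (t + 1) temp _ (by omega)]
        congr 1
        exact if_congr (and_congr_left' hcond.symm) rfl rfl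

theorem pvALoop_stop (ref que : List Char) (i_start diag_len que_len k m i j temp : Int)
    (ms : List (Int × Int)) (h : ¬(i < i_start + diag_len ∧ j < que_len)) :
    ∀ fuel, pvALoop ref que i_start diag_len que_len k m fuel i j temp ms = ms
  | 0 => by simp [pvALoop]
  | fuel + 1 => by rw [pvALoop, if_neg h]

-- ===== VERDICT (by name: the statement is the Claim_ definition above) =====
theorem process_diagonal_spec : Claim_equal_process_diagonal := by
  intro d rs qs k m rl ql _ hpre
  unfold Spec_process_diagonal
  simp only [process_diagonal, process_diagonal_alt]
  set i0 : Int := max d 0 with hi0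
  set j0 : Int := max (-d) 0 with hj0
  set n : Int := min (rl - i0) (ql - j0) with hn
  by_cases hn0 : n ≤ 0
  · rw [if_pos hn0, pvALoop_stop _ _ _ _ _ _ _ _ _ _ _ (by rintro ⟨h1, -⟩; omega)]
  · rw [if_neg hn0]
    rcases hpre with h | ⟨hk, hrl, hql⟩
    · rw [← hi0, ← hj0, ← hn] at h; omega
    obtain ⟨I, hI⟩ : ∃ I : Nat, i0 = (I : Int) := ⟨i0.toNat, by omega⟩
    obtain ⟨J, hJ⟩ : ∃ J : Nat, j0 = (J : Int) := ⟨j0.toNat, by omega⟩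
    obtain ⟨NN, hNN⟩ : ∃ NN : Nat, n = (NN : Int) := ⟨n.toNat, by omega⟩
    rw [hI, hJ, hNN]
    simp only [Int.toNat_natCast]
    have hr : I + NN ≤ rs.toList.length := by
      have h1 : n ≤ rl - i0 := min_le_left _ _
      omega
    have hq : J + NN ≤ qs.toList.length := by
      have h1 : n ≤ ql - j0 := min_le_right _ _
      omega
    have hql2 : (J : Int) + NN ≤ ql := by
      have h1 : n ≤ ql - j0 := min_le_right _ _
      omega
    simpa using pvLoop_eq rs.toList qs.toList I J NN ql k m hk hr hq hql2
      (2 * NN + 2) 0 0 [] (by omega)
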